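-- pv_equiv track=rewrite | github.com/mscaudill/tabbed | sniffing.py | _mislengthed
-- ===== SOURCE A (Python) =====
-- from typing import IO, List, Optional, Tuple
--
-- def _mislengthed(
--
--     rows: List[List[str]],
--     line_nums: List[int],
-- ) -> int | None:
--     """Finds the largest indexed row whose length does not match the length
--     of the last row.
--
--     Metadata rows are not required to be the same length as data rows. The
--     first row above a data section in the absence of a header whose length
--     does not match the last row is likely a metadata row.
--
--     Args:
--         rows:
--             A list of list of representing each file in sample.
--         line_nums:
--             The line numbers of each list in sample accounting for skip rows.
--
--     Returns:
--         An integer line number or None.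
--     """
--
--     # search rows from bottom to top to get largest indexed row
--     for num, row in reversed(list(zip(line_nums, rows))):
--         if len(row) != len(rows[-1]):
--             return num
--
--     return None
-- ===== SOURCE B (Python) =====
-- from typing import List, Optional
--
-- def _mislengthed(
--     rows: List[List[str]],
--     line_nums: List[int],
-- ) -> Optional[int]:
--     if not rows:
--         return None
--     target = len(rows[-1])
--     result = None
--     for num, row in zip(line_nums, rows):
--         if len(row) != target:
--             result = num
--     return result
-- ===== Notes on version B (the rewrite author's own statement) =====
-- stated objective: simpler
-- what changed: Replaces the reversed-list-of-zip scan with early return by a single forward pass keeping a running last-match accumulator, with the target length computed once; no list(zip(...)) materialization or reversal.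
import Mathlib
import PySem

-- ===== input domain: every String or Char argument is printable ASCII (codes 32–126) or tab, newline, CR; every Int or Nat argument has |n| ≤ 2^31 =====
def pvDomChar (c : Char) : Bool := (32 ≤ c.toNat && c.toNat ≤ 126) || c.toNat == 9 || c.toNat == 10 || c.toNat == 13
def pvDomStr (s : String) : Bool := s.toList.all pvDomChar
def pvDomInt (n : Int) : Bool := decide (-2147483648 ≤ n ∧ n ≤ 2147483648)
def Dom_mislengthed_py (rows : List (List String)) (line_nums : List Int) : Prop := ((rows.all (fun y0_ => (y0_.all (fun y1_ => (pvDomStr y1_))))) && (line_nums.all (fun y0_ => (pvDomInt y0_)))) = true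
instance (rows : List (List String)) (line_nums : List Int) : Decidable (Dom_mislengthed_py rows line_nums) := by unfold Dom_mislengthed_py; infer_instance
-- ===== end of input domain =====

-- B replaces A's reversed-scan-with-early-return by a single forward pass with a
-- last-match accumulator and a target length computed once (objective: simpler).


-- ===== PORT A =====
-- the `for … reversed(list(zip(line_nums, rows)))` loop with early return;
-- `rows[-1]` (pyGet?) is only evaluated inside the loop, where rows ≠ [] makes it `some`
def mislengthedGoA (rows : List (List String)) : List (Int × List String) → Option Int
  | [] => none
  | (num, row) :: rest =>
      if row.length ≠ ((PySem.List.pyGet? rows (-1)).getD []).length then some num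
      else mislengthedGoA rows rest

def mislengthed_py (rows : List (List String)) (line_nums : List Int) : Option Int :=
  mislengthedGoA rows ((line_nums.zip rows).reverse)

-- ===== PORT B =====
def mislengthed_py_alt (rows : List (List String)) (line_nums : List Int) : Option Int :=
  match rows.getLast? with
  | none => none
  | some lastRow =>
      (line_nums.zip rows).foldl
        (fun result p => if p.2.length ≠ lastRow.length then some p.1 else result) none

-- ===== PRECONDITION & SPEC =====
def Spec_mislengthed_py (rows : List (List String)) (line_nums : List Int) (out : Option Int) : Prop := out = mislengthed_py_alt rows line_nums
instance (rows : List (List String)) (line_nums : List Int) (out : Option Int) : Decidable (Spec_mislengthed_py rows line_nums out) := by unfold Spec_mislengthed_py; infer_instance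

-- ===== CLAIM (what is proved, stated in full; the proofs are below) =====
def Claim_equal_mislengthed_py : Prop := ∀ (rows : List (List String)) (line_nums : List Int), Dom_mislengthed_py rows line_nums → Spec_mislengthed_py rows line_nums (mislengthed_py rows line_nums)

-- ===== LEMMAS AND PROOFS =====

-- A's loop with the target length abstracted out
def ggo (L : Nat) : List (Int × List String) → Option Int
  | [] => none
  | (num, row) :: rest => if row.length ≠ L then some num else ggo L rest

theorem goA_eq_ggo (rows : List (List String)) (l : List (Int × List String)) :
    mislengthedGoA rows l = ggo (((PySem.List.pyGet? rows (-1)).getD []).length) l := by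
  induction l with
  | nil => rfl
  | cons x rest ih =>
      obtain ⟨num, row⟩ := x
      simp only [mislengthedGoA, ggo, ih]

theorem ggo_append (L : Nat) (m : List (Int × List String)) (x : Int × List String) :
    ggo L (m ++ [x]) = (ggo L m).or (if x.2.length ≠ L then some x.1 else none) := by
  induction m with
  | nil => simp [ggo]
  | cons y rest ih =>
      obtain ⟨num, row⟩ := y
      by_cases h : row.length ≠ L <;> simp [ggo, h, ih]

theorem foldl_eq_ggo_rev (L : Nat) (l : List (Int × List String)) (a : Option Int) :
    l.foldl (fun result p => if p.2.length ≠ L then some p.1 else result) a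
      = (ggo L l.reverse).or a := by
  induction l generalizing a with
  | nil => simp [ggo]
  | cons x rest ih =>
      simp only [List.foldl_cons, List.reverse_cons, ih, ggo_append, Option.or_assoc]
      congr 1
      by_cases h : x.2.length ≠ L <;> simp [h]

-- ===== VERDICT (by name: the statement is the Claim_ definition above) =====
theorem mislengthed_py_spec : Claim_equal_mislengthed_py := by
  intro rows line_nums _
  unfold Spec_mislengthed_py mislengthed_py mislengthed_py_alt
  cases hlast : rows.getLast? with
  | none =>
      have hrows : rows = [] := List.getLast?_eq_none_iff.mp hlast
      subst hrows
      simp [mislengthedGoA]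
  | some lastRow =>
      rw [goA_eq_ggo, PySem.List.pyGet?_neg_one, hlast]
      simp only [Option.getD_some]
      rw [foldl_eq_ggo_rev, Option.or_none]
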